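-- pv_equiv track=rewrite | github.com/John-CU-Ahn/Visualizing-Eigenvector-Dynamics | PC EQ Cartesian scalar weights.py | makeColor
-- ===== SOURCE A (Python) =====
-- def makeColor(pix_number):
--     r = 0
--     g = 150
--     b = 255
--     alpha = 0.2
--     pix_rl = []
--     pix_gl = []
--     pix_bl = []
--     count = -1
--     for i in range(pix_number):
--         count = count + 1
--         if count <256:
--             r = r + 1
--             if r == 256:
--                 r = 255
--             pix_rl.append(r)
--             pix_gl.append(g)
--             pix_bl.append(b)
--         else:
--             r = r-1
--             g = (g + 1)%255
--             pix_rl.append(r)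
--             pix_gl.append(g)
--             pix_bl.append(b)
--
--     return pix_bl,pix_gl,pix_rl
-- ===== SOURCE B (Python) =====
-- def makeColor(pix_number):
--     pix_rl = [min(i + 1, 255) if i < 256 else 510 - i for i in range(pix_number)]
--     pix_gl = [150 if i < 256 else (150 + (i - 255)) % 255 for i in range(pix_number)]
--     pix_bl = [255 for _ in range(pix_number)]
--     return pix_bl, pix_gl, pix_rl
-- ===== Notes on version B (the rewrite author's own statement) =====
-- stated objective: simpler
-- what changed: Replaces the stateful loop carrying running r/g/count accumulators with three independent comprehensions that compute each channel's value directly from the index via a closed-form per-phase formula.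
import Mathlib
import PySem

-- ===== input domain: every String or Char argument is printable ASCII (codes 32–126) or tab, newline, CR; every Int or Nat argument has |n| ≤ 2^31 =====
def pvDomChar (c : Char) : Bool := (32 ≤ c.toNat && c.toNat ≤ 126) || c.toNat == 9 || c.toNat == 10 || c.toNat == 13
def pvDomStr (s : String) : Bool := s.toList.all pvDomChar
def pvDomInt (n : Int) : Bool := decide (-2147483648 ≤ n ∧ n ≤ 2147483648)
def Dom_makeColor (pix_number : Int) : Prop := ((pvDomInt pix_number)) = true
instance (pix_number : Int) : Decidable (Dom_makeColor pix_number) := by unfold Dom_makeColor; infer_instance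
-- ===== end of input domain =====

-- B replaces A's stateful running r/g/count loop by per-index closed-form channel values
-- computed independently for each i (objective: simpler; same asymptotic cost).

-- ===== PORT A =====
-- one loop iteration of A: state is (r, g, count, pix_rl, pix_gl, pix_bl); the loop index i is unused
def aStep (st : Int × Int × Int × List Int × List Int × List Int) (_i : Int) :
    Int × Int × Int × List Int × List Int × List Int :=
  match st with
  | (r, g, count, rl, gl, bl) =>
    let count := count + 1
    if count < 256 then
      let r := r + 1
      let r := if r = 256 then 255 else r
      (r, g, count, rl ++ [r], gl ++ [g], bl ++ [(255 : Int)])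
    else
      let r := r - 1
      let g := PySem.Int.mod (g + 1) 255
      (r, g, count, rl ++ [r], gl ++ [g], bl ++ [(255 : Int)])

def makeColor (pix_number : Int) : List Int × List Int × List Int :=
  let s := (PySem.List.pyRange 0 pix_number 1).foldl aStep (0, 150, -1, [], [], [])
  (s.2.2.2.2.2, s.2.2.2.2.1, s.2.2.2.1)

-- ===== PORT B =====
def fR (i : Int) : Int := if i < 256 then min (i + 1) 255 else 510 - i
def fG (i : Int) : Int := if i < 256 then 150 else PySem.Int.mod (150 + (i - 255)) 255

def makeColor_alt (pix_number : Int) : List Int × List Int × List Int :=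
  let rng := PySem.List.pyRange 0 pix_number 1
  (rng.map (fun _ => (255 : Int)), rng.map fG, rng.map fR)

-- ===== PRECONDITION & SPEC =====
def Spec_makeColor (pix_number : Int) (out : List Int × List Int × List Int) : Prop := out = makeColor_alt pix_number
instance (pix_number : Int) (out : List Int × List Int × List Int) : Decidable (Spec_makeColor pix_number out) := by unfold Spec_makeColor; infer_instance

-- ===== CLAIM (what is proved, stated in full; the proofs are below) =====
def Claim_equal_makeColor : Prop := ∀ (pix_number : Int), Dom_makeColor pix_number → Spec_makeColor pix_number (makeColor pix_number)

-- ===== LEMMAS AND PROOFS =====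

-- closed forms for A's running state after m iterations
def rS (m : Nat) : Int := if (m : Int) ≤ 256 then min (m : Int) 255 else 511 - m
def gS (m : Nat) : Int := if (m : Int) ≤ 256 then 150 else PySem.Int.mod ((m : Int) - 106) 255

theorem rS_succ (m : Nat) : rS (m + 1) = fR (m : Int) := by
  simp only [rS, fR]
  push_cast
  split_ifs <;> omega

theorem gS_succ (m : Nat) : gS (m + 1) = fG (m : Int) := by
  simp only [gS, fG]
  push_cast
  split_ifs with h1 h2
  · rfl
  · omega
  · omega
  · congr 1; ring

theorem foldl_aStep_closed (m : Nat) :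
    ((List.range m).map (Nat.cast : Nat → Int)).foldl aStep (0, 150, -1, [], [], []) =
      (rS m, gS m, (m : Int) - 1,
        (List.range m).map (fun k : Nat => fR (k : Int)),
        (List.range m).map (fun k : Nat => fG (k : Int)),
        (List.range m).map (fun _ : Nat => (255 : Int))) := by
  induction m with
  | zero => simp [rS, gS]
  | succ m ih =>
    have h0 : (0 : Int) ≤ (m : Int) := Int.natCast_nonneg m
    rw [List.range_succ]
    simp only [List.map_append, List.foldl_append, ih, List.map_cons, List.map_nil,
      List.foldl_cons, List.foldl_nil, aStep]
    by_cases hm : (m : Int) < 256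
    · rw [if_pos (by omega : (m : Int) - 1 + 1 < 256)]
      have hrm : (if rS m + 1 = 256 then (255 : Int) else rS m + 1) = fR (m : Int) := by
        simp only [rS, fR]
        split_ifs <;> omega
      have hg : gS m = 150 := by simp only [gS]; rw [if_pos (by omega)]
      have hfg : fG (m : Int) = 150 := by simp only [fG]; rw [if_pos hm]
      rw [hrm, hg, hfg, rS_succ]
      have hg1 : gS (m + 1) = 150 := by rw [gS_succ, hfg]
      rw [hg1]
      simp only [Prod.mk.injEq, and_true, true_and]
      push_cast; ring
    · rw [if_neg (by omega : ¬ ((m : Int) - 1 + 1 < 256))]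
      have hrm : rS m - 1 = fR (m : Int) := by
        simp only [rS, fR]
        split_ifs <;> omega
      have hgm : PySem.Int.mod (gS m + 1) 255 = fG (m : Int) := by
        simp only [gS, fG]
        rw [if_neg hm]
        split_ifs with h1
        · have h256 : (m : Int) = 256 := by omega
          rw [h256]
          decide
        · have h150 : (150 : Int) + ((m : Int) - 255) = (m : Int) - 106 + 1 := by ring
          rw [h150]
          rw [PySem.Int.mod_eq_emod_of_pos (by omega : (0:Int) < 255),
            PySem.Int.mod_eq_emod_of_pos (by omega : (0:Int) < 255),
            PySem.Int.mod_eq_emod_of_pos (by omega : (0:Int) < 255)]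
          conv_rhs => rw [Int.add_emod]
          norm_num
      rw [hrm, hgm, rS_succ, gS_succ]
      simp only [Prod.mk.injEq, and_true, true_and]
      push_cast; ring

-- ===== VERDICT (by name: the statement is the Claim_ definition above) =====
set_option maxRecDepth 8192 in
theorem makeColor_spec : Claim_equal_makeColor := by
  intro n _
  show makeColor n = makeColor_alt n
  unfold makeColor makeColor_alt
  by_cases hn : n ≤ 0
  · rw [PySem.List.pyRange_one_eq_nil hn]
    rfl
  · have h : n = ((n.toNat : Nat) : Int) := by omega
    rw [h, PySem.List.pyRange_zero_natCast, foldl_aStep_closed]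
    simp only [List.map_map]
    rfl
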